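-- pv_equiv track=rewrite | github.com/jur-clerkx/advent-of-code-2022 | day15.py | get_sensor_coverage_for_y_row
-- ===== SOURCE A (Python) =====
-- def get_sensor_coverage_for_y_row(sensors: list, y_row: int) -> set:
--     result = set()
--     for x1, y1, x2, y2 in sensors:
--         signal_distance = abs(x1 - x2) + abs(y1 - y2)
--         x_rest = signal_distance - abs(y_row - y1)
--         if x_rest >= 0:
--             for x in range(x1 - x_rest, x1 + x_rest + 1, 1):
--                 result.add(x)
--     return result
-- ===== SOURCE B (Python) =====
-- def get_sensor_coverage_for_y_row(sensors: list, y_row: int) -> set: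
--     # Interval-subtraction algorithm: keep the intervals already emitted and, per
--     # sensor, subtract them from its interval, emitting only the genuinely new
--     # x-values (no per-element membership tests against the growing set).
--     covered = []   # intervals already emitted (in arrival order, may overlap)
--     out = []       # distinct x values, in first-emission order
--     for x1, y1, x2, y2 in sensors:
--         x_rest = abs(x1 - x2) + abs(y1 - y2) - abs(y_row - y1)
--         if x_rest >= 0:
--             pieces = [(x1 - x_rest, x1 + x_rest)]
--             for clo, chi in covered:
--                 nxt = []
--                 for lo, hi in pieces:
--                     if hi < clo or chi < lo:
--                         nxt.append((lo, hi))
--                     else: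
--                         if lo < clo:
--                             nxt.append((lo, clo - 1))
--                         if chi < hi:
--                             nxt.append((chi + 1, hi))
--                 pieces = nxt
--             for lo, hi in pieces:
--                 out.extend(range(lo, hi + 1))
--             covered.append((x1 - x_rest, x1 + x_rest))
--     return set(out)
-- ===== Notes on version B (the rewrite author's own statement) =====
-- stated objective: alternative
-- what changed: A inserts every covered x of every sensor into a set one element at a time; B keeps the list of already-emitted intervals, subtracts them from each new sensor's interval (interval arithmetic), and emits only the genuinely new x values, so no per-element membership test against the growing set is ever made.
import Mathlib
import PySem

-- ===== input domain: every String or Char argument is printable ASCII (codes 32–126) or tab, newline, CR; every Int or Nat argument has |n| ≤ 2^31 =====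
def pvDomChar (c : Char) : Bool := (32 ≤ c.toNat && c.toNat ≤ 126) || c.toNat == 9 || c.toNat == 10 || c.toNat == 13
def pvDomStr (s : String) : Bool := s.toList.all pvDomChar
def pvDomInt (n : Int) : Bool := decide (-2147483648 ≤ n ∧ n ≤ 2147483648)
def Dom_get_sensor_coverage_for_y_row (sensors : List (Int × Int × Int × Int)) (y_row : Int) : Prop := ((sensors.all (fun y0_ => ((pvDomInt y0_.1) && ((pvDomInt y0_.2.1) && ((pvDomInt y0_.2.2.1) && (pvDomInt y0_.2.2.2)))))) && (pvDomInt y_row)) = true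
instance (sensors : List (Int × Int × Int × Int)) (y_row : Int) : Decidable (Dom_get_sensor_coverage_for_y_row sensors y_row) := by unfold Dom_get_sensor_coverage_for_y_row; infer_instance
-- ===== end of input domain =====

-- B replaces A's per-element set insertion by interval subtraction: it keeps the
-- intervals already emitted and per sensor subtracts them from the sensor's
-- interval, emitting only the new x values (alternative algorithm, same result).

-- ===== PORT A =====
def get_sensor_coverage_for_y_row (sensors : List (Int × Int × Int × Int)) (y_row : Int) : List Int :=
  sensors.foldl (fun result s =>
    let (x1, y1, x2, y2) := s
    let signal_distance := |x1 - x2| + |y1 - y2|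
    let x_rest := signal_distance - |y_row - y1|
    if x_rest ≥ 0 then
      (PySem.List.pyRange (x1 - x_rest) (x1 + x_rest + 1) 1).foldl PySem.Set.add result
    else result) PySem.Set.empty

-- ===== PORT B =====
-- inner loop 'for lo, hi in pieces: …' of Source B (one covered interval subtracted)
def pvSubOne (clo chi : Int) (pieces : List (Int × Int)) : List (Int × Int) :=
  pieces.foldl (fun nxt p =>
    if p.2 < clo || chi < p.1 then nxt ++ [p]
    else
      let nxt := if p.1 < clo then nxt ++ [(p.1, clo - 1)] else nxt
      if chi < p.2 then nxt ++ [(chi + 1, p.2)] else nxt) []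

def get_sensor_coverage_for_y_row_alt (sensors : List (Int × Int × Int × Int)) (y_row : Int) : List Int :=
  let st := sensors.foldl (fun (st : List (Int × Int) × List Int) s =>
    let (x1, y1, x2, y2) := s
    let x_rest := |x1 - x2| + |y1 - y2| - |y_row - y1|
    if x_rest ≥ 0 then
      let pieces := st.1.foldl (fun pieces c => pvSubOne c.1 c.2 pieces) [(x1 - x_rest, x1 + x_rest)]
      let out := pieces.foldl (fun out p => out ++ PySem.List.pyRange p.1 (p.2 + 1) 1) st.2
      (st.1 ++ [(x1 - x_rest, x1 + x_rest)], out)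
    else st) ([], [])
  PySem.Set.ofList st.2

-- ===== PRECONDITION & SPEC =====
def Spec_get_sensor_coverage_for_y_row (sensors : List (Int × Int × Int × Int)) (y_row : Int) (out : List Int) : Prop := out = get_sensor_coverage_for_y_row_alt sensors y_row
instance (sensors : List (Int × Int × Int × Int)) (y_row : Int) (out : List Int) : Decidable (Spec_get_sensor_coverage_for_y_row sensors y_row out) := by unfold Spec_get_sensor_coverage_for_y_row; infer_instance

-- ===== CLAIM (what is proved, stated in full; the proofs are below) =====
def Claim_equal_get_sensor_coverage_for_y_row : Prop := ∀ (sensors : List (Int × Int × Int × Int)) (y_row : Int), Dom_get_sensor_coverage_for_y_row sensors y_row → Spec_get_sensor_coverage_for_y_row sensors y_row (get_sensor_coverage_for_y_row sensors y_row)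

-- ===== LEMMAS AND PROOFS =====

-- the per-piece split of Source B's inner loop body, as a list of pieces
def pvCutL (clo chi : Int) (p : Int × Int) : List (Int × Int) :=
  if p.2 < clo || chi < p.1 then [p]
  else (if p.1 < clo then [(p.1, clo - 1)] else []) ++ (if chi < p.2 then [(chi + 1, p.2)] else [])
def pvEmit (pieces : List (Int × Int)) : List Int :=
  pieces.flatMap (fun p => PySem.List.pyRange p.1 (p.2 + 1) 1)

lemma eq_of_mem_iff_of_sorted (l1 l2 : List Int)
    (h1 : l1.Pairwise (· < ·)) (h2 : l2.Pairwise (· < ·))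
    (hm : ∀ x, x ∈ l1 ↔ x ∈ l2) : l1 = l2 := by
  have d1 : l1.Nodup := h1.imp (fun h => ne_of_lt h)
  have d2 : l2.Nodup := h2.imp (fun h => ne_of_lt h)
  exact PySem.List.eq_of_perm_of_pairwise_le_of_injective (fun x => x)
    (fun a b h => h) ((List.perm_ext_iff_of_nodup d1 d2).mpr hm)
    (h1.imp le_of_lt) (h2.imp le_of_lt)


lemma pvEmit_cut (clo chi : Int) (hcc : clo ≤ chi) (p : Int × Int) :
    pvEmit (pvCutL clo chi p)
      = (PySem.List.pyRange p.1 (p.2 + 1) 1).filter (fun x => decide (x < clo) || decide (chi < x)) := by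
  apply eq_of_mem_iff_of_sorted
  · unfold pvCutL pvEmit
    split_ifs <;>
      simp only [List.flatMap_cons, List.flatMap_nil, List.flatMap_append, List.append_nil,
        List.nil_append, List.Pairwise.nil] <;>
      first
        | exact PySem.List.pairwise_lt_pyRange_one ..
        | exact List.Pairwise.nil
        | (rw [List.pairwise_append]
           refine ⟨PySem.List.pairwise_lt_pyRange_one .., PySem.List.pairwise_lt_pyRange_one .., ?_⟩
           intro a ha b hb
           rw [PySem.List.mem_pyRange_one] at ha hb
           omega)
  · exact (PySem.List.pairwise_lt_pyRange_one ..).filter _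
  · intro x
    unfold pvCutL pvEmit
    split_ifs with h1 h2 h3 <;>
      simp_all [PySem.List.mem_pyRange_one, List.mem_filter] <;> omega

lemma pvSubOne_eq_flatMap (clo chi : Int) (pieces : List (Int × Int)) :
    pvSubOne clo chi pieces = pieces.flatMap (pvCutL clo chi) := by
  have hb : (fun (nxt : List (Int × Int)) p =>
      if p.2 < clo || chi < p.1 then nxt ++ [p]
      else
        let nxt := if p.1 < clo then nxt ++ [(p.1, clo - 1)] else nxt
        if chi < p.2 then nxt ++ [(chi + 1, p.2)] else nxt)
      = fun nxt p => nxt ++ pvCutL clo chi p := by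
    funext nxt p
    unfold pvCutL
    split_ifs <;> simp
  rw [pvSubOne, hb, PySem.List.foldl_append_eq_flatMap]
  rfl

lemma pvFilter_flatMap {α : Type} (l : List α) (f : α → List Int) (p : Int → Bool) :
    (l.flatMap f).filter p = l.flatMap (fun x => (f x).filter p) := by
  induction l with
  | nil => rfl
  | cons h t ih => simp [List.flatMap_cons, List.filter_append, ih]

lemma pvEmit_subOne (clo chi : Int) (hcc : clo ≤ chi) (pieces : List (Int × Int)) :
    pvEmit (pvSubOne clo chi pieces)
      = (pvEmit pieces).filter (fun x => decide (x < clo) || decide (chi < x)) := by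
  rw [pvSubOne_eq_flatMap]
  unfold pvEmit
  rw [List.flatMap_assoc, pvFilter_flatMap]
  exact List.flatMap_congr (fun p _ => pvEmit_cut clo chi hcc p)

lemma pvEmit_subFold (covered : List (Int × Int)) (hends : ∀ c ∈ covered, c.1 ≤ c.2)
    (pieces : List (Int × Int)) :
    pvEmit (covered.foldl (fun ps c => pvSubOne c.1 c.2 ps) pieces)
      = (pvEmit pieces).filter (fun x => covered.all (fun c => decide (x < c.1) || decide (c.2 < x))) := by
  induction covered generalizing pieces with
  | nil => simp
  | cons c cs ih =>
    rw [List.foldl_cons, ih (fun d hd => hends d (List.mem_cons_of_mem _ hd)),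
      pvEmit_subOne c.1 c.2 (hends c List.mem_cons_self)]
    rw [List.filter_filter]
    apply List.filter_congr
    intro x _
    simp [List.all_cons, Bool.and_comm]

lemma pvAddFold (out : List Int) (a b : Int) :
    (PySem.List.pyRange a b 1).foldl PySem.Set.add out
      = out ++ (PySem.List.pyRange a b 1).filter (fun x => !(PySem.Set.contains out x)) := by
  rw [show (PySem.List.pyRange a b 1).foldl PySem.Set.add out
      = PySem.Set.update out (PySem.List.pyRange a b 1) from rfl,
    PySem.Set.update_eq_append_filter,
    PySem.Set.ofList_eq_self_of_nodup _ (PySem.List.nodup_pyRange_one ..)]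

lemma pvMain (y_row : Int) (sensors : List (Int × Int × Int × Int)) :
    ∀ (covered : List (Int × Int)) (out : List Int), out.Nodup →
    (∀ c ∈ covered, c.1 ≤ c.2) →
    (∀ x : Int, x ∈ out ↔ ∃ c ∈ covered, c.1 ≤ x ∧ x ≤ c.2) →
    sensors.foldl (fun result s =>
      let (x1, y1, x2, y2) := s
      let signal_distance := |x1 - x2| + |y1 - y2|
      let x_rest := signal_distance - |y_row - y1|
      if x_rest ≥ 0 then
        (PySem.List.pyRange (x1 - x_rest) (x1 + x_rest + 1) 1).foldl PySem.Set.add result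
      else result) out
    = (sensors.foldl (fun (st : List (Int × Int) × List Int) s =>
        let (x1, y1, x2, y2) := s
        let x_rest := |x1 - x2| + |y1 - y2| - |y_row - y1|
        if x_rest ≥ 0 then
          let pieces := st.1.foldl (fun pieces c => pvSubOne c.1 c.2 pieces) [(x1 - x_rest, x1 + x_rest)]
          let out := pieces.foldl (fun out p => out ++ PySem.List.pyRange p.1 (p.2 + 1) 1) st.2
          (st.1 ++ [(x1 - x_rest, x1 + x_rest)], out)
        else st) (covered, out)).2 := by
  induction sensors with
  | nil => intro covered out _ _ _; rfl
  | cons s rest ih =>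
    intro covered out hnd hends hinv
    obtain ⟨x1, y1, x2, y2⟩ := s
    rw [List.foldl_cons, List.foldl_cons]
    dsimp only
    by_cases hr : |x1 - x2| + |y1 - y2| - |y_row - y1| ≥ 0
    · rw [if_pos hr, if_pos hr]
      set L := x1 - (|x1 - x2| + |y1 - y2| - |y_row - y1|) with hL
      set H := x1 + (|x1 - x2| + |y1 - y2| - |y_row - y1|) with hH
      have hpt : ∀ x : Int, (!(PySem.Set.contains out x))
          = covered.all (fun c => decide (x < c.1) || decide (c.2 < x)) := by
        intro x
        rw [Bool.eq_iff_iff]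
        simp only [Bool.not_eq_true', ← Bool.not_eq_true, PySem.Set.contains_iff,
          List.all_eq_true, Bool.or_eq_true, decide_eq_true_eq, hinv x]
        constructor
        · intro hno c hc
          by_contra hcon
          push Not at hcon
          exact hno ⟨c, hc, by omega⟩
        · rintro hall ⟨c, hc, hle⟩
          rcases hall c hc with h | h <;> omega
      have hAstep : (PySem.List.pyRange L (H + 1) 1).foldl PySem.Set.add out
          = out ++ (PySem.List.pyRange L (H + 1) 1).filter
              (fun x => covered.all (fun c => decide (x < c.1) || decide (c.2 < x))) := by
        rw [pvAddFold]
        congr 1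
        exact List.filter_congr (fun x _ => hpt x)
      have hBstep : (covered.foldl (fun pieces c => pvSubOne c.1 c.2 pieces) [(L, H)]).foldl
            (fun out p => out ++ PySem.List.pyRange p.1 (p.2 + 1) 1) out
          = out ++ (PySem.List.pyRange L (H + 1) 1).filter
              (fun x => covered.all (fun c => decide (x < c.1) || decide (c.2 < x))) := by
        rw [PySem.List.foldl_append_eq_flatMap]
        congr 1
        rw [show (covered.foldl (fun pieces c => pvSubOne c.1 c.2 pieces) [(L, H)]).flatMap
              (fun p => PySem.List.pyRange p.1 (p.2 + 1) 1)
            = pvEmit (covered.foldl (fun ps c => pvSubOne c.1 c.2 ps) [(L, H)]) from rfl,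
          pvEmit_subFold covered hends]
        congr 1
        simp [pvEmit]
      rw [hAstep, hBstep]
      apply ih
      · -- Nodup of the new out
        apply List.Nodup.append hnd
          (((PySem.List.nodup_pyRange_one ..)).filter _)
        intro a ha hb
        have := (List.mem_filter.mp hb).2
        rw [← hpt a] at this
        simp only [Bool.not_eq_true', ← Bool.not_eq_true, PySem.Set.contains_iff] at this
        exact this ha
      · -- ends of the new covered
        intro c hc
        rcases List.mem_append.mp hc with h | h
        · exact hends c h
        · simp only [List.mem_singleton] at h; subst h; simp only; omega
      · -- the invariant for the new state
        intro x
        simp only [List.mem_append, List.mem_filter, PySem.List.mem_pyRange_one, hinv x,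
          List.mem_singleton, List.all_eq_true, Bool.or_eq_true, decide_eq_true_eq]
        constructor
        · rintro (⟨c, hc, hle⟩ | ⟨⟨hxl, hxh⟩, _⟩)
          · exact ⟨c, Or.inl hc, hle⟩
          · exact ⟨(L, H), Or.inr rfl, by omega⟩
        · rintro ⟨c, hc, hle⟩
          rcases hc with h | h
          · exact Or.inl ⟨c, h, hle⟩
          · subst h
            by_cases hx : ∃ c ∈ covered, c.1 ≤ x ∧ x ≤ c.2
            · exact Or.inl hx
            · refine Or.inr ⟨⟨by omega, by omega⟩, ?_⟩
              intro c hc'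
              by_contra hcon
              push Not at hcon
              exact hx ⟨c, hc', by omega⟩
    · rw [if_neg hr, if_neg hr]
      exact ih covered out hnd hends hinv

lemma pvANodup (y_row : Int) (sensors : List (Int × Int × Int × Int)) :
    ∀ (out : List Int), out.Nodup →
    (sensors.foldl (fun result s =>
      let (x1, y1, x2, y2) := s
      let signal_distance := |x1 - x2| + |y1 - y2|
      let x_rest := signal_distance - |y_row - y1|
      if x_rest ≥ 0 then
        (PySem.List.pyRange (x1 - x_rest) (x1 + x_rest + 1) 1).foldl PySem.Set.add result
      else result) out).Nodup := by
  induction sensors with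
  | nil => intro out h; exact h
  | cons s rest ih =>
    intro out h
    obtain ⟨x1, y1, x2, y2⟩ := s
    rw [List.foldl_cons]
    dsimp only
    split_ifs with hr
    · exact ih _ (PySem.Set.nodup_update _ _ h)
    · exact ih _ h

-- ===== VERDICT (by name: the statement is the Claim_ definition above) =====
theorem get_sensor_coverage_for_y_row_spec : Claim_equal_get_sensor_coverage_for_y_row := by
  intro sensors y_row _
  show _ = _
  simp only [get_sensor_coverage_for_y_row, get_sensor_coverage_for_y_row_alt]
  rw [← pvMain y_row sensors [] [] (by simp) (by simp) (by simp)]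
  exact (PySem.Set.ofList_eq_self_of_nodup _ (pvANodup y_row sensors [] (by simp))).symm
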